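-- pv_equiv track=rewrite | github.com/krzyzuj/ChannelPacker | utils.py | resolution_to_suffix
-- ===== SOURCE A (Python) =====
-- from typing import Dict, Iterable, List, Optional, Set, Tuple, Any
--
-- def resolution_to_suffix(size: Tuple[int, int]) -> str:
-- # Tries to match the actual image size to a size suffix.
--
--     width = max(size)
--     for threshold, label in [
--         (512, "512"), (1024, "1K"), (2048, "2K"), (4096, "4K"), (8192, "8K")
--     ]:
--         if width <= threshold:
--             return label
--         # Returns the full size if it does not match any suffix threshold.
--     return f"{width}px"
-- ===== SOURCE B (Python) =====
-- import bisect
--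
-- _THRESHOLDS = [512, 1024, 2048, 4096, 8192]
-- _LABELS = ["512", "1K", "2K", "4K", "8K"]
--
-- def resolution_to_suffix(size):
--     width = max(size)
--     i = bisect.bisect_left(_THRESHOLDS, width)
--     if i < len(_LABELS):
--         return _LABELS[i]
--     return f"{width}px"
-- ===== Notes on version B (the rewrite author's own statement) =====
-- stated objective: idiomatic
-- what changed: Replaces the linear scan-and-return loop over (threshold, label) pairs with a binary-search index lookup (bisect_left) into a sorted threshold table and a parallel label list.
import Mathlib
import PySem

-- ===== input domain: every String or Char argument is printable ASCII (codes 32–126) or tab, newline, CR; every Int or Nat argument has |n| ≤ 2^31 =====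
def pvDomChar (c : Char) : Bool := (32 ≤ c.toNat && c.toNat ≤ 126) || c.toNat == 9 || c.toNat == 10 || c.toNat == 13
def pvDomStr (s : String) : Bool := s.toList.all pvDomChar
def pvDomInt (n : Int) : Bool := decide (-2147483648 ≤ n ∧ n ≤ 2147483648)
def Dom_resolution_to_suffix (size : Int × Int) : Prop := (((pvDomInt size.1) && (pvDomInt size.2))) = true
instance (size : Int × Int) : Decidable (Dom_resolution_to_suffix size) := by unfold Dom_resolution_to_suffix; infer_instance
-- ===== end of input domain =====

-- B replaces A's linear scan over (threshold,label) pairs by a bisect_left binary search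
-- into a sorted threshold table with a parallel label list (idiomatic; same cost on a 5-entry table).

-- ===== PORT A =====
-- A's for-loop over the literal pair list, returning the first label with width ≤ threshold.
def rtsLoop (width : Int) : List (Int × String) → String
  | [] => PySem.Int.toStr width ++ "px"
  | (t, l) :: rest => if width ≤ t then l else rtsLoop width rest

def resolution_to_suffix (size : Int × Int) : String :=
  let width := max size.1 size.2
  rtsLoop width [(512, "512"), (1024, "1K"), (2048, "2K"), (4096, "4K"), (8192, "8K")]

-- ===== PORT B =====
-- bisect.bisect_left(xs, x) on [lo, hi): binary search, step for step.
def bisectLeft (xs : List Int) (x : Int) (lo hi : Nat) : Nat :=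
  if _h : lo < hi then
    let mid := (lo + hi) / 2
    if xs.getD mid 0 < x then bisectLeft xs x (mid + 1) hi
    else bisectLeft xs x lo mid
  else lo
termination_by hi - lo
decreasing_by all_goals omega

def rtsThresholds : List Int := [512, 1024, 2048, 4096, 8192]
def rtsLabels : List String := ["512", "1K", "2K", "4K", "8K"]

def resolution_to_suffix_alt (size : Int × Int) : String :=
  let width := max size.1 size.2
  let i := bisectLeft rtsThresholds width 0 rtsThresholds.length
  if i < rtsLabels.length then rtsLabels.getD i ""
  else PySem.Int.toStr width ++ "px"

-- ===== PRECONDITION & SPEC =====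
def Spec_resolution_to_suffix (size : Int × Int) (out : String) : Prop := out = resolution_to_suffix_alt size
instance (size : Int × Int) (out : String) : Decidable (Spec_resolution_to_suffix size out) := by unfold Spec_resolution_to_suffix; infer_instance

-- ===== CLAIM (what is proved, stated in full; the proofs are below) =====
def Claim_equal_resolution_to_suffix : Prop := ∀ (size : Int × Int), Dom_resolution_to_suffix size → Spec_resolution_to_suffix size (resolution_to_suffix size)

-- ===== LEMMAS AND PROOFS =====
set_option maxRecDepth 4000 in
theorem bl0 (w : Int) (h : w ≤ 512) : bisectLeft rtsThresholds w 0 5 = 0 := by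
  simp [bisectLeft.eq_def, rtsThresholds]; split_ifs <;> omega

set_option maxRecDepth 4000 in
theorem bl1 (w : Int) (h0 : 512 < w) (h : w ≤ 1024) : bisectLeft rtsThresholds w 0 5 = 1 := by
  simp [bisectLeft.eq_def, rtsThresholds]; split_ifs <;> omega

set_option maxRecDepth 4000 in
theorem bl2 (w : Int) (h0 : 1024 < w) (h : w ≤ 2048) : bisectLeft rtsThresholds w 0 5 = 2 := by
  simp [bisectLeft.eq_def, rtsThresholds]; split_ifs <;> omega

set_option maxRecDepth 4000 in
theorem bl3 (w : Int) (h0 : 2048 < w) (h : w ≤ 4096) : bisectLeft rtsThresholds w 0 5 = 3 := by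
  simp [bisectLeft.eq_def, rtsThresholds]; split_ifs <;> omega

set_option maxRecDepth 4000 in
theorem bl4 (w : Int) (h0 : 4096 < w) (h : w ≤ 8192) : bisectLeft rtsThresholds w 0 5 = 4 := by
  simp [bisectLeft.eq_def, rtsThresholds]; split_ifs <;> omega

set_option maxRecDepth 4000 in
theorem bl5 (w : Int) (h0 : 8192 < w) : bisectLeft rtsThresholds w 0 5 = 5 := by
  simp [bisectLeft.eq_def, rtsThresholds]; split_ifs <;> omega

theorem rts_eq (w : Int) :
    rtsLoop w [(512, "512"), (1024, "1K"), (2048, "2K"), (4096, "4K"), (8192, "8K")] =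
      (let i := bisectLeft rtsThresholds w 0 rtsThresholds.length
       if i < rtsLabels.length then rtsLabels.getD i ""
       else PySem.Int.toStr w ++ "px") := by
  have hlen : rtsThresholds.length = 5 := by simp [rtsThresholds]
  by_cases h1 : w ≤ 512
  · simp [rtsLoop, hlen, bl0 w h1, rtsLabels, h1]
  · by_cases h2 : w ≤ 1024
    · simp [rtsLoop, hlen, bl1 w (by omega) h2, rtsLabels, h1, h2]
    · by_cases h3 : w ≤ 2048
      · simp [rtsLoop, hlen, bl2 w (by omega) h3, rtsLabels, h1, h2, h3]
      · by_cases h4 : w ≤ 4096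
        · simp [rtsLoop, hlen, bl3 w (by omega) h4, rtsLabels, h1, h2, h3, h4]
        · by_cases h5 : w ≤ 8192
          · simp [rtsLoop, hlen, bl4 w (by omega) h5, rtsLabels, h1, h2, h3, h4, h5]
          · simp [rtsLoop, hlen, bl5 w (by omega), rtsLabels, h1, h2, h3, h4, h5]

-- ===== VERDICT (by name: the statement is the Claim_ definition above) =====
theorem resolution_to_suffix_spec : Claim_equal_resolution_to_suffix := by
  intro size _
  unfold Spec_resolution_to_suffix resolution_to_suffix resolution_to_suffix_alt
  exact rts_eq (max size.1 size.2)
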